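-- pv_equiv track=rewrite | github.com/SpiderOak/ldap-reader | ldap_reader/reader.py | _filter_ldap_results
-- ===== SOURCE A (Python) =====
-- class TooManyLdapResults(Exception):
--     '''
--     Thrown when we get too many LDAP results.
--     '''
--     pass
--
-- class NotEnoughLdapResults(Exception):
--     '''
--     Thrown when we don't get enough LDAP results.
--     '''
--     pass
--
-- def _filter_ldap_results(results):
--     '''
--     Checks LDAP results for too many or too little results.
--     '''
--
--     result_list = [(dist_name, result)
--                    for dist_name, result in results
--                    if dist_name is not None]
--
--     # Make sure there are enough results.
--     if len(result_list) < 1: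
--         raise NotEnoughLdapResults()
--
--     # Having more than one result for this is not good.
--     if len(result_list) > 1:
--         raise TooManyLdapResults()
--
--     return result_list[0]
-- ===== SOURCE B (Python) =====
-- class TooManyLdapResults(Exception):
--     pass
--
-- class NotEnoughLdapResults(Exception):
--     pass
--
-- def _filter_ldap_results(results):
--     '''
--     Checks LDAP results for too many or too little results.
--     Find the first non-None entry by index, then check the remaining
--     slice contains no further match; return the entry at that index.
--     '''
--     for i, (dist_name, result) in enumerate(results):
--         if dist_name is not None:
--             break
--     else:
--         raise NotEnoughLdapResults()
--     if any(dn is not None for dn, _ in results[i + 1:]):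
--         raise TooManyLdapResults()
--     return results[i]
-- ===== Notes on version B (the rewrite author's own statement) =====
-- stated objective: alternative
-- what changed: Instead of materializing the whole filtered list and counting it, B finds the index of the first non-None entry (for/else), then short-circuits with any() over the remaining slice to detect a second match, and returns the element at the found index.
-- outside the precondition, e.g. on _filter_ldap_results([]): A raises NotEnoughLdapResults, B raises NotEnoughLdapResults; on _filter_ldap_results([('a', {}), ('b', {})]): A raises TooManyLdapResults, B raises TooManyLdapResults
import Mathlib
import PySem

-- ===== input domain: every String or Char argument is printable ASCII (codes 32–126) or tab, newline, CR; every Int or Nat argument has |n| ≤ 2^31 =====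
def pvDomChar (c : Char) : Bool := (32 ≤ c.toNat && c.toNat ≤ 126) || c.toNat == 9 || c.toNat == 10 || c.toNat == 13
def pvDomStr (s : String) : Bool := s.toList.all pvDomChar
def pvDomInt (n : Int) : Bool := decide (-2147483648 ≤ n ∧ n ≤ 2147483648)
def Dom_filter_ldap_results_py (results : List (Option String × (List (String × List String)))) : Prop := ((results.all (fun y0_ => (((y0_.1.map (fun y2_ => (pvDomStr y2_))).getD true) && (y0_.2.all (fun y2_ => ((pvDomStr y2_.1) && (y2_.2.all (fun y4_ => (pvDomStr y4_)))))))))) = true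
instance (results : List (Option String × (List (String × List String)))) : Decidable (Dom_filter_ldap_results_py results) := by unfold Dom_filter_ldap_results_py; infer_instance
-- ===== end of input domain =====

-- B replaces A's build-filtered-list-then-count by find-first-index, then an
-- any() check over the remaining slice, returning the element at that index
-- (objective: alternative). Both raise outside Pre_.


-- ===== PORT A =====
-- A: build the filtered list (dist_name not None), raise if its length is < 1 or > 1,
-- otherwise return its element 0. Raises are excluded by Pre_; headD's default is unreachable there.
def filter_ldap_results_py (results : List (Option String × (List (String × List String)))) : Option String × (List (String × List String)) :=
  let result_list := results.filter (fun p => p.1.isSome)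
  if result_list.length < 1 then (none, [])        -- raise NotEnoughLdapResults (outside Pre_)
  else if result_list.length > 1 then (none, [])   -- raise TooManyLdapResults (outside Pre_)
  else result_list.headD (none, [])

-- ===== PORT B =====
-- B's for/enumerate/break-else loop: index of the first entry with non-None dist_name.
def pvFindIdx (rs : List (Option String × (List (String × List String)))) : Option Nat :=
  match rs with
  | [] => none
  | (d, _) :: t => if d.isSome then some 0 else (pvFindIdx t).map (· + 1)

-- B: find first match index i (for/else raises if none), any() over results[i+1:]
-- (slice from nonnegative i+1 = drop, exact), return results[i] (0 ≤ i < len, so getD is exact).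
def filter_ldap_results_py_alt (results : List (Option String × (List (String × List String)))) : Option String × (List (String × List String)) :=
  match pvFindIdx results with
  | none => (none, [])                              -- raise NotEnoughLdapResults (outside Pre_)
  | some i =>
    if (results.drop (i + 1)).any (fun p => p.1.isSome) then (none, [])  -- raise TooManyLdapResults (outside Pre_)
    else results.getD i (none, [])

-- ===== PRECONDITION & SPEC =====
-- Pre_: exactly one entry with a non-None dist_name; on all other inputs A raises
-- (NotEnoughLdapResults / TooManyLdapResults) and so does B.
def Pre_filter_ldap_results_py (results : List (Option String × (List (String × List String)))) : Prop :=
  (results.filter (fun p => p.1.isSome)).length = 1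
instance (results : List (Option String × (List (String × List String)))) : Decidable (Pre_filter_ldap_results_py results) := by unfold Pre_filter_ldap_results_py; infer_instance

def pvWitness_filter_ldap_results_py : (List (Option String × (List (String × List String)))) :=
  [(none, []), (some "cn=bob", [("mail", ["b@x.com"])])]

def Spec_filter_ldap_results_py (results : List (Option String × (List (String × List String)))) (out : Option String × (List (String × List String))) : Prop := out = filter_ldap_results_py_alt results
instance (results : List (Option String × (List (String × List String)))) (out : Option String × (List (String × List String))) : Decidable (Spec_filter_ldap_results_py results out) := by unfold Spec_filter_ldap_results_py; infer_instance

-- ===== CLAIM (what is proved, stated in full; the proofs are below) =====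
def Claim_equal_filter_ldap_results_py : Prop := ∀ (results : List (Option String × (List (String × List String)))), Dom_filter_ldap_results_py results → Pre_filter_ldap_results_py results → Spec_filter_ldap_results_py results (filter_ldap_results_py results)

-- ===== LEMMAS AND PROOFS =====

-- Skipping a non-matching head does not change B's result.
theorem alt_cons_none (d : Option String) (r : List (String × List String))
    (t : List (Option String × (List (String × List String)))) (hd : d.isSome = false) :
    filter_ldap_results_py_alt ((d, r) :: t) = filter_ldap_results_py_alt t := by
  unfold filter_ldap_results_py_alt
  simp only [pvFindIdx, hd, Bool.false_eq_true, if_false]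
  cases h : pvFindIdx t with
  | none => simp
  | some j => simp [List.getD]

-- Under Pre_ (exactly one match), B returns the head of the filtered list.
theorem alt_eq_head (rs : List (Option String × (List (String × List String))))
    (h : (rs.filter (fun p => p.1.isSome)).length = 1) :
    filter_ldap_results_py_alt rs = (rs.filter (fun p => p.1.isSome)).headD (none, []) := by
  induction rs with
  | nil => simp at h
  | cons hd t ih =>
    obtain ⟨d, r⟩ := hd
    by_cases hd' : d.isSome
    · simp only [List.filter_cons, hd', if_pos] at h ⊢
      simp only [List.length_cons] at h
      have h0 : t.filter (fun p => p.1.isSome) = [] := by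
        have := List.length_eq_zero_iff.mp (by omega : (t.filter (fun p => p.1.isSome)).length = 0)
        exact this
      have hany : t.any (fun p => p.1.isSome) = false := by
        rw [List.any_eq_false]
        intro x hx
        have := List.filter_eq_nil_iff.mp h0 x hx
        simpa using this
      unfold filter_ldap_results_py_alt
      simp [pvFindIdx, hd', hany, List.getD]
    · have hd0 : d.isSome = false := by simpa using hd'
      simp only [List.filter_cons, hd0, Bool.false_eq_true, if_false] at h ⊢
      rw [alt_cons_none d r t hd0]
      exact ih h

-- ===== VERDICT (by name: the statement is the Claim_ definition above) =====
theorem filter_ldap_results_py_spec : Claim_equal_filter_ldap_results_py := by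
  intro results _ hpre
  unfold Spec_filter_ldap_results_py
  unfold Pre_filter_ldap_results_py at hpre
  rw [alt_eq_head results hpre]
  unfold filter_ldap_results_py
  simp [hpre]
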